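-- pv_equiv track=rewrite | github.com/michelleresian/Codility | Solution.py | solution
-- ===== SOURCE A (Python) =====
-- def solution(A, D):
-- #everything in the bank at the begining is 0
--     card_payments = 0
--     card_payment_total = 0
--     account_balance = 0
--
--     #Track of card payments by month
--     card_payments_by_month = {}
--
--     # transactions using the amount and dates
--     for amount, date in zip(A, D):
--         # now split the dates into the year, month,date,
--         year, month, _ = date.split('-')
-- # If the transaction is an incoming transfer
--         if amount < 0:
--         #Take the current value of account_balance, add the value of amount to it, and then assign the result back to account_balance
--             account_balance += amount
--         else:  # If it's a card payment
--             account_balance += amount - 5  # Deduct 5 for card payment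
--             card_payments += 1
--             card_payment_total += amount
--             # Update card payments by month
--             if month in card_payments_by_month:
--                 card_payments_by_month[month] += 1
--             else:
--                 card_payments_by_month[month] = 1
--
--     # unless there were at least 3 payments made by a card for a total cost of atleast 100
--     if card_payments >= 3 and card_payment_total >= 1000:
--         for month, num_payments in card_payments_by_month.items():
--             if num_payments >= 3:
--                 account_balance -= 5  # Deduct $5 for each month with 3 or more card payments
--
--     return account_balance
-- ===== SOURCE B (Python) =====
-- def solution(A, D):
--     pairs = list(zip(A, D))
--     months = sorted(d.split('-')[1] for a, d in pairs if a >= 0)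
--     bal = sum(a for a, _ in pairs) - 5 * len(months)
--     if len(months) >= 3 and sum(a for a, d in pairs if a >= 0) >= 1000:
--         # sorted months group equal values contiguously: one run-length scan
--         # counts the months with >= 3 card payments (no dict needed)
--         prev, run = None, 0
--         for m in months:
--             if m == prev:
--                 run += 1
--             else:
--                 if run >= 3:
--                     bal -= 5
--                 prev, run = m, 1
--         if run >= 3:
--             bal -= 5
--     return bal
-- ===== Notes on version B (the rewrite author's own statement) =====
-- stated objective: alternative
-- what changed: Replaces A's running-balance loop with a per-month dict counter and a final items pass by a different data structure and traversal: card-payment months are sorted and the months with >= 3 payments are counted by a single run-length scan over the sorted list, with the balance obtained arithmetically as sum(A) - 5*count.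
import Mathlib
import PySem

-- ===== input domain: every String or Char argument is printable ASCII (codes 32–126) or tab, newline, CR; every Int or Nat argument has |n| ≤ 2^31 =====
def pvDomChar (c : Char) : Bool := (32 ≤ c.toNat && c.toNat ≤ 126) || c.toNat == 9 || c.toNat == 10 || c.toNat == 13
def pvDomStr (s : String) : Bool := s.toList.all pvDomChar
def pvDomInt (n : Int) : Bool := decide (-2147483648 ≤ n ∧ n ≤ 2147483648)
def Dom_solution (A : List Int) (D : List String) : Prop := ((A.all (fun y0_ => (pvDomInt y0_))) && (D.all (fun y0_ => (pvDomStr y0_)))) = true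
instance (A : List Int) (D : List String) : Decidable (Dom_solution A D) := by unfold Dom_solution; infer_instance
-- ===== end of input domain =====

-- B replaces A's dict month-counter by sorting the card-payment months and counting
-- heavy months with one run-length scan over the sorted list (objective: alternative).

-- date.split('-')[1]: the 'month' of A's 3-way unpack and B's [1]-index; total form
-- (defaults never reached under Pre_solution, where every paired date splits into parts of which index 1 exists).
def pvMonth (s : String) : String := ((PySem.Str.split? s "-").getD []).getD 1 ""

-- ===== PORT A =====
-- state = (card_payments, card_payment_total, account_balance, card_payments_by_month)
def solution (A : List Int) (D : List String) : Int :=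
  let fin := (List.zip A D).foldl
    (fun (st : Int × Int × Int × PySem.Dict String Int) p =>
      let month := pvMonth p.2
      if p.1 < 0 then
        (st.1, st.2.1, st.2.2.1 + p.1, st.2.2.2)
      else
        (st.1 + 1, st.2.1 + p.1, st.2.2.1 + (p.1 - 5),
         if st.2.2.2.contains month then st.2.2.2.modify month 0 (· + 1)
         else st.2.2.2.insert month 1))
    (0, 0, 0, PySem.Dict.empty)
  if fin.1 ≥ 3 ∧ fin.2.1 ≥ 1000 then
    fin.2.2.2.items.foldl (fun bal kv => if kv.2 ≥ 3 then bal - 5 else bal) fin.2.2.1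
  else fin.2.2.1

-- ===== PORT B =====
-- months sorted ascending; the for-loop is a run-length scan with state (bal, prev, run)
def solution_alt (A : List Int) (D : List String) : Int :=
  let pairs := List.zip A D
  let months := PySem.List.sorted ((pairs.filter (fun p => 0 ≤ p.1)).map (fun p => pvMonth p.2)) (fun x => x) false
  let bal := (pairs.map Prod.fst).sum - 5 * (months.length : Int)
  if 3 ≤ (months.length : Int) ∧ 1000 ≤ ((pairs.filter (fun p => 0 ≤ p.1)).map Prod.fst).sum then
    let st := months.foldl
      (fun (st : Int × Option String × Int) m =>
        if some m = st.2.1 then (st.1, st.2.1, st.2.2 + 1)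
        else ((if 3 ≤ st.2.2 then st.1 - 5 else st.1), some m, 1))
      (bal, none, 0)
    if 3 ≤ st.2.2 then st.1 - 5 else st.1
  else bal

-- ===== PRECONDITION & SPEC =====
-- A unpacks 'year, month, _ = date.split('-')' for every zipped pair and raises ValueError
-- unless the date has exactly two '-' (three parts); Pre_ admits exactly those inputs.
def Pre_solution (A : List Int) (D : List String) : Prop :=
  ∀ s ∈ D.take (min A.length D.length), PySem.Str.count s "-" = 2
instance (A : List Int) (D : List String) : Decidable (Pre_solution A D) := by unfold Pre_solution; infer_instance
def pvWitness_solution : List Int × List String := ([500, 600, -20, 700], ["2020-01-03", "2020-01-04", "2020-02-01", "2020-01-05"])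

def Spec_solution (A : List Int) (D : List String) (out : Int) : Prop := out = solution_alt A D
instance (A : List Int) (D : List String) (out : Int) : Decidable (Spec_solution A D out) := by unfold Spec_solution; infer_instance

-- ===== CLAIM (what is proved, stated in full; the proofs are below) =====
def Claim_equal_solution : Prop := ∀ (A : List Int) (D : List String), Dom_solution A D → Pre_solution A D → Spec_solution A D (solution A D)

-- ===== LEMMAS AND PROOFS =====

-- number of distinct values that occur at least 3 times in l
def pvHeavy (l : List String) : Int :=
  (((PySem.Set.ofList l).filter (fun m => 3 ≤ (l.count m : Int))).length : Int)

-- B's loop body and final check, named so the fold can be rewritten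
def pvScanStep (st : Int × Option String × Int) (m : String) : Int × Option String × Int :=
  if some m = st.2.1 then (st.1, st.2.1, st.2.2 + 1)
  else ((if 3 ≤ st.2.2 then st.1 - 5 else st.1), some m, 1)

def pvScanFin (st : Int × Option String × Int) : Int :=
  if 3 ≤ st.2.2 then st.1 - 5 else st.1

-- A's dict step (membership test, then modify-or-insert) is exactly Counter's step.
theorem pv_dict_step (d : PySem.Dict String Int) (k : String) :
    (if d.contains k then d.modify k 0 (· + 1) else d.insert k 1) = d.modify k 0 (· + 1) := by
  by_cases h : d.contains k
  · rw [if_pos h]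
  · rw [if_neg (by simp [h])]
    have h2 : d.get? k = none := by
      rw [← Option.not_isSome_iff_eq_none, ← PySem.Dict.contains_eq_isSome_get?]; simpa using h
    simp [PySem.Dict.modify, PySem.Dict.getD, h2]

-- A's loop characterised: aggregates plus the Counter fold of the month list.
theorem pv_loop (l : List (Int × String)) : ∀ (cp cpt bal : Int) (d : PySem.Dict String Int),
    l.foldl
      (fun (st : Int × Int × Int × PySem.Dict String Int) p =>
        let month := pvMonth p.2
        if p.1 < 0 then
          (st.1, st.2.1, st.2.2.1 + p.1, st.2.2.2)
        else
          (st.1 + 1, st.2.1 + p.1, st.2.2.1 + (p.1 - 5),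
           if st.2.2.2.contains month then st.2.2.2.modify month 0 (· + 1)
           else st.2.2.2.insert month 1))
      (cp, cpt, bal, d) =
    (cp + ((l.filter (fun p => 0 ≤ p.1)).length : Int),
     cpt + ((l.filter (fun p => 0 ≤ p.1)).map Prod.fst).sum,
     bal + (l.map Prod.fst).sum - 5 * ((l.filter (fun p => 0 ≤ p.1)).length : Int),
     ((l.filter (fun p => 0 ≤ p.1)).map (fun p => pvMonth p.2)).foldl
       (fun d m => d.modify m 0 (· + 1)) d) := by
  induction l with
  | nil => intro cp cpt bal d; simp
  | cons p t ih =>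
    intro cp cpt bal d
    by_cases hp : p.1 < 0
    · have hp' : ¬ (0 ≤ p.1) := by omega
      simp only [List.foldl_cons, List.filter_cons, List.map_cons, hp, hp', if_pos, decide_false, Bool.false_eq_true, ite_false, List.sum_cons]
      rw [ih]
      refine Prod.ext ?_ (Prod.ext ?_ (Prod.ext ?_ rfl)) <;> (simp; try ring)
    · have hp' : (0 ≤ p.1) := by omega
      simp only [List.foldl_cons, List.filter_cons, List.map_cons, hp, hp',
        decide_true, ite_true, ite_false, List.sum_cons, List.length_cons]
      rw [pv_dict_step, ih]
      refine Prod.ext ?_ (Prod.ext ?_ (Prod.ext ?_ rfl)) <;> (push_cast; ring)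

-- A's final pass over the items subtracts 5 per value ≥ 3.
theorem pv_final (xs : List (String × Int)) : ∀ bal : Int,
    xs.foldl (fun bal kv => if kv.2 ≥ 3 then bal - 5 else bal) bal
      = bal - 5 * ((xs.filter (fun kv => 3 ≤ kv.2)).length : Int) := by
  induction xs with
  | nil => intro bal; simp
  | cons kv t ih =>
    intro bal
    by_cases h : 3 ≤ kv.2
    · simp only [List.foldl_cons, List.filter_cons, h, ge_iff_le, if_pos, decide_true,
        List.length_cons]
      rw [ih]; push_cast; ring
    · simp only [List.foldl_cons, List.filter_cons, h, ge_iff_le, decide_false,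
        Bool.false_eq_true, ite_false]
      rw [ih]

-- the heavy count is invariant under permutation
theorem pvHeavy_perm {l l' : List String} (h : l.Perm l') : pvHeavy l = pvHeavy l' := by
  unfold pvHeavy
  have hp : (PySem.Set.ofList l).Perm (PySem.Set.ofList l') :=
    (List.perm_ext_iff_of_nodup (PySem.Set.nodup_ofList l) (PySem.Set.nodup_ofList l')).mpr
      (by intro x; simp only [PySem.Set.mem_ofList]; exact h.mem_iff)
  have hc : (fun m => decide (3 ≤ (l.count m : Int))) = (fun m => decide (3 ≤ (l'.count m : Int))) := by
    funext m; rw [h.count_eq]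
  rw [hc, (hp.filter _).length_eq]

-- split off one member's contribution to the heavy count
theorem pvHeavy_split (l : List String) (m : String) (hm : m ∈ l) :
    pvHeavy l = (if (3 : Int) ≤ (l.count m : Int) then 1 else 0) + pvHeavy (l.filter (· ≠ m)) := by
  unfold pvHeavy
  have hnd := PySem.Set.nodup_ofList l
  have hm' : m ∈ PySem.Set.ofList l := (PySem.Set.mem_ofList l m).mpr hm
  have hperm : (PySem.Set.ofList l).Perm (m :: (PySem.Set.ofList l).filter (· ≠ m)) := by
    have h1 := List.perm_cons_erase hm'
    have he : (PySem.Set.ofList l).erase m = (PySem.Set.ofList l).filter (· ≠ m) := by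
      rw [List.Nodup.erase_eq_filter hnd m]
      exact List.filter_congr (by intro x _; simp [bne, Bool.beq_eq_decide_eq])
    rw [← he]; exact h1
  rw [(hperm.filter _).length_eq]
  have hp2 : (PySem.Set.ofList (l.filter (· ≠ m))).Perm ((PySem.Set.ofList l).filter (· ≠ m)) :=
    (List.perm_ext_iff_of_nodup (PySem.Set.nodup_ofList _) (hnd.filter _)).mpr
      (by intro x; simp [PySem.Set.mem_ofList, List.mem_filter])
  have hcount : ∀ x ∈ (PySem.Set.ofList (l.filter (· ≠ m))),
      (decide (3 ≤ ((l.filter (· ≠ m)).count x : Int))) = (decide (3 ≤ (l.count x : Int))) := by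
    intro x hx
    have hxm : x ≠ m := by
      have := (PySem.Set.mem_ofList _ _).mp hx
      simpa using (List.mem_filter.mp this).2
    rw [List.count_filter (by simpa using hxm)]
  rw [List.filter_congr hcount, (hp2.filter _).length_eq]
  rw [List.filter_cons]
  by_cases h3 : (3 : Int) ≤ (l.count m : Int)
  · simp only [h3, decide_true, if_true, List.length_cons]
    push_cast; ring
  · simp only [h3, decide_false, if_false]
    push_cast; ring

-- B's run-length scan over the tail of a sorted list
theorem pv_scan (t : List String) : ∀ (p : String) (bal r : Int),
    (p :: t).Pairwise (· ≤ ·) →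
    pvScanFin (t.foldl pvScanStep (bal, some p, r))
    = bal - 5 * ((if (3 : Int) ≤ r + (t.count p : Int) then 1 else 0) + pvHeavy (t.filter (· ≠ p))) := by
  induction t with
  | nil =>
    intro p bal r _
    simp only [List.foldl_nil, List.count_nil, List.filter_nil, pvScanFin]
    have h0 : pvHeavy [] = 0 := rfl
    rw [h0]
    push_cast
    split_ifs <;> (first | ring1 | (exfalso; omega))
  | cons m t ih =>
    intro p bal r hpw
    have hpm : p ≤ m := (List.pairwise_cons.mp hpw).1 m (by simp)
    have hmt : (m :: t).Pairwise (· ≤ ·) := (List.pairwise_cons.mp hpw).2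
    by_cases hmp : m = p
    · subst hmp
      have hstep : pvScanStep (bal, some m, r) m = (bal, some m, r + 1) := by
        simp [pvScanStep]
      rw [List.foldl_cons, hstep, ih m bal (r + 1) hmt]
      rw [List.count_cons_self, List.filter_cons]
      simp only [ne_eq, not_true_eq_false, decide_false, Bool.false_eq_true, if_false]
      push_cast
      split_ifs <;> (first | ring1 | (exfalso; omega))
    · have hplt : p < m := lt_of_le_of_ne hpm (fun h => hmp h.symm)
      have hpnot : p ∉ m :: t := by
        intro hmem
        rcases List.mem_cons.mp hmem with h | h
        · exact hmp h.symm
        · exact (not_le.mpr hplt) ((List.pairwise_cons.mp hmt).1 p h)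
      have hcnt0 : (m :: t).count p = 0 := List.count_eq_zero.mpr hpnot
      have hstep : pvScanStep (bal, some p, r) m = ((if 3 ≤ r then bal - 5 else bal), some m, 1) := by
        simp [pvScanStep, hmp]
      rw [List.foldl_cons, hstep, ih m (if 3 ≤ r then bal - 5 else bal) 1 hmt, hcnt0]
      have hfilter : (m :: t).filter (· ≠ p) = m :: t := by
        apply List.filter_eq_self.mpr
        intro x hx
        simp only [decide_eq_true_eq]
        intro hxp; exact hpnot (hxp ▸ hx)
      rw [hfilter]
      have hsplit : pvHeavy (m :: t)
          = (if (3:Int) ≤ ((m :: t).count m : Int) then 1 else 0) + pvHeavy ((m :: t).filter (· ≠ m)) :=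
        pvHeavy_split (m :: t) m (by simp)
      rw [List.count_cons_self, List.filter_cons] at hsplit
      simp only [ne_eq, not_true_eq_false, decide_false, Bool.false_eq_true, if_false] at hsplit
      rw [hsplit]
      simp only [ne_eq]
      push_cast
      split_ifs <;> (first | ring1 | (exfalso; omega))

-- B's whole scan computes the heavy count of any sorted list
theorem pv_scan_top (ms : List String) (bal : Int) (h : ms.Pairwise (· ≤ ·)) :
    pvScanFin (ms.foldl pvScanStep (bal, none, 0)) = bal - 5 * pvHeavy ms := by
  cases ms with
  | nil => simp [pvScanFin, pvHeavy, PySem.Set.ofList]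
  | cons m t =>
    have hstep : pvScanStep (bal, none, 0) m = (bal, some m, 1) := by
      simp [pvScanStep]
    rw [List.foldl_cons, hstep, pv_scan t m bal 1 h]
    have hsplit : pvHeavy (m :: t)
        = (if (3:Int) ≤ ((m :: t).count m : Int) then 1 else 0) + pvHeavy ((m :: t).filter (· ≠ m)) :=
      pvHeavy_split (m :: t) m (by simp)
    rw [List.count_cons_self, List.filter_cons] at hsplit
    simp only [ne_eq, not_true_eq_false, decide_false, Bool.false_eq_true, if_false] at hsplit
    rw [hsplit]
    simp only [ne_eq]
    push_cast
    split_ifs <;> (first | ring1 | (exfalso; omega))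

-- ===== VERDICT (by name: the statement is the Claim_ definition above) =====
theorem solution_spec : Claim_equal_solution := by
  intro A D _ _
  unfold Spec_solution solution solution_alt
  rw [pv_loop]
  simp only [zero_add]
  generalize List.zip A D = l
  generalize hms : List.map (fun p => pvMonth p.2) (List.filter (fun p => decide (0 ≤ p.1)) l) = ms
  have hscanfun : (fun (st : Int × Option String × Int) m =>
        if some m = st.2.1 then (st.1, st.2.1, st.2.2 + 1)
        else ((if 3 ≤ st.2.2 then st.1 - 5 else st.1), some m, 1)) = pvScanStep := rfl
  rw [hscanfun]
  have hlen : ((List.filter (fun p => decide (0 ≤ p.1)) l).length : Int) = (ms.length : Int) := by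
    rw [← hms, List.length_map]
  have hsortlen : ((PySem.List.sorted ms (fun x => x) false).length : Int) = (ms.length : Int) := by
    rw [PySem.List.length_sorted]
  rw [hlen, hsortlen]
  by_cases hb : (3:Int) ≤ (ms.length : Int) ∧ 1000 ≤ (List.map Prod.fst (List.filter (fun p => decide (0 ≤ p.1)) l)).sum
  · rw [if_pos (by constructor <;> [omega; exact hb.2]), if_pos hb]
    rw [← PySem.Dict.counter_eq_foldl, pv_final]
    have hitems : ((((PySem.Dict.counter ms).items.filter (fun kv => (3:Int) ≤ kv.2)).length : Int)) = pvHeavy ms := by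
      rw [PySem.Dict.items_counter, List.filter_map, List.length_map]
      rfl
    have hpw : (PySem.List.sorted ms (fun x => x) false).Pairwise (· ≤ ·) := by
      have := PySem.List.sorted_pairwise ms (fun x => x)
      simpa using this
    have hscan := pv_scan_top (PySem.List.sorted ms (fun x => x) false)
      ((List.map Prod.fst l).sum - 5 * (ms.length : Int)) hpw
    rw [pvScanFin] at hscan
    rw [hscan]
    have hperm : pvHeavy (PySem.List.sorted ms (fun x => x) false) = pvHeavy ms :=
      pvHeavy_perm (PySem.List.sorted_perm ms (fun x => x) false)
    rw [hperm]
    rw [hitems]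
  · rw [if_neg (by intro hc; exact hb ⟨by omega, hc.2⟩), if_neg hb]
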